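-- pv_equiv track=rewrite | github.com/moonyeol/algorithm | python/programmers_level1.py | solution
-- ===== SOURCE A (Python) =====
-- def solution(n):
--     n= list(str(n))
--     new = []
--     result = ''
--     for i in n:
--         new.append(int(i))
--     new.sort(reverse=True)
--     for i in new:
--         result+=str(i)
--     answer = int(result)
--     return answer
-- ===== SOURCE B (Python) =====
-- def solution(n):
--     counts = [0] * 10
--     for c in str(n):
--         counts[int(c)] += 1
--     result = ''
--     for d in range(9, -1, -1):
--         result += str(d) * counts[d]
--     return int(result)
-- ===== Notes on version B (the rewrite author's own statement) =====
-- stated objective: alternative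
-- what changed: B replaces A's build-list-then-comparison-sort of the digits by a counting sort: one pass tallies each digit into a fixed-size table, then the result string is emitted from the largest digit down to the smallest.
import Mathlib
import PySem

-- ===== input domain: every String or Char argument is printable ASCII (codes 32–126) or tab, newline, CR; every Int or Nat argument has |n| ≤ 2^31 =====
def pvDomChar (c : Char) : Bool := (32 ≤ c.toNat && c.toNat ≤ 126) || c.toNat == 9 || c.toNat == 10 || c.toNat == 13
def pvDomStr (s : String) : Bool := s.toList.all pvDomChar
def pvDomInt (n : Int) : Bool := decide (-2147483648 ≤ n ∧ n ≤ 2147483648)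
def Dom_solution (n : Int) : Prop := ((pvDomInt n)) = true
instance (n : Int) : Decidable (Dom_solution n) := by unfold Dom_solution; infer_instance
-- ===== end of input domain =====

-- B replaces A's comparison sort of the digits by a counting sort over a fixed-size tally table (alternative algorithm).

-- int(c) for a one-character string c; none = ValueError, which Pre_ excludes (only '-' of a negative n).
def pyIntChar (c : Char) : Int := (PySem.Int.ofChars? [c]).getD 0

-- ===== PORT A =====
def solution (n : Int) : Int :=
  -- n = list(str(n))  (string worked on as List Char throughout, per PySem convention)
  let chars := PySem.Int.toChars n
  -- new = []; for i in n: new.append(int(i))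
  let new := chars.foldl (fun acc i => acc ++ [pyIntChar i]) ([] : List Int)
  -- new.sort(reverse=True)
  let sortedNew := PySem.List.sorted new (fun x => x) true
  -- result = ''; for i in new: result += str(i)
  let result := sortedNew.foldl (fun acc i => acc ++ PySem.Int.toChars i) ([] : List Char)
  -- answer = int(result)
  (PySem.Int.ofChars? result).getD 0

-- ===== PORT B =====
def solution_alt (n : Int) : Int :=
  -- counts = [0] * 10
  let counts0 : List Int := List.replicate 10 0
  -- for c in str(n): counts[int(c)] += 1
  let counts := (PySem.Int.toChars n).foldl
    (fun cnts c =>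
      let i := pyIntChar c
      cnts.set i.toNat (cnts.getD i.toNat 0 + 1)) counts0
  -- result = ''; for d in range(9, -1, -1): result += str(d) * counts[d]
  let result := (PySem.List.pyRange 9 (-1) (-1)).foldl
    (fun acc d => acc ++ PySem.List.pyRepeat (PySem.Int.toChars d) (counts.getD d.toNat 0)) ([] : List Char)
  -- return int(result)
  (PySem.Int.ofChars? result).getD 0

-- ===== PRECONDITION & SPEC =====
-- Pre_ excludes n < 0, on which the Python A raises ValueError at int('-').
def Pre_solution (n : Int) : Prop := 0 ≤ n
instance (n : Int) : Decidable (Pre_solution n) := by unfold Pre_solution; infer_instance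
def pvWitness_solution : Int := (118372)

def Spec_solution (n : Int) (out : Int) : Prop := out = solution_alt n
instance (n : Int) (out : Int) : Decidable (Spec_solution n out) := by unfold Spec_solution; infer_instance

-- ===== CLAIM (what is proved, stated in full; the proofs are below) =====
def Claim_equal_solution : Prop := ∀ (n : Int), Dom_solution n → Pre_solution n → Spec_solution n (solution n)

-- ===== LEMMAS AND PROOFS =====

def digitChars : List Char := ['0','1','2','3','4','5','6','7','8','9']

lemma mem_toDigitsCore (fuel : Nat) : ∀ (n : Nat) (acc : List Char),
    (∀ c ∈ acc, c ∈ digitChars) → ∀ c ∈ Nat.toDigitsCore 10 fuel n acc, c ∈ digitChars := by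
  induction fuel with
  | zero => intro n acc hacc c hc; exact hacc c hc
  | succ fuel ih =>
    intro n acc hacc c hc
    have hd : (n % 10).digitChar ∈ digitChars := by
      have h10 : n % 10 < 10 := Nat.mod_lt _ (by norm_num)
      interval_cases (n % 10) <;> decide
    rw [Nat.toDigitsCore] at hc
    by_cases hz : n / 10 = 0
    · simp only [hz] at hc
      rcases List.mem_cons.mp hc with h | h
      · exact h ▸ hd
      · exact hacc c h
    · simp only [if_neg hz] at hc
      exact ih (n / 10) _ (by
        intro c' hc'
        rcases List.mem_cons.mp hc' with h | h
        · exact h ▸ hd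
        · exact hacc c' h) c hc

lemma mem_toChars_digit (n : Int) (hn : 0 ≤ n) :
    ∀ c ∈ PySem.Int.toChars n, c ∈ digitChars := by
  unfold PySem.Int.toChars
  rw [if_neg (by omega), Nat.toDigits]
  exact mem_toDigitsCore _ _ _ (by simp)

lemma pyIntChar_digit (c : Char) (h : c ∈ digitChars) :
    0 ≤ pyIntChar c ∧ pyIntChar c ≤ 9 ∧ PySem.Int.toChars (pyIntChar c) = [c] := by
  fin_cases h <;> exact ⟨by decide, by decide, by decide⟩

-- descending counting-sort layout of a digit list
def descOf (xs : List Int) : List Int :=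
  ([9,8,7,6,5,4,3,2,1,0] : List Int).flatMap (fun d => List.replicate (xs.count d) d)

set_option maxHeartbeats 1000000 in
lemma sorted_eq_descOf (xs : List Int) (h : ∀ x ∈ xs, 0 ≤ x ∧ x ≤ 9) :
    PySem.List.sorted xs (fun x => x) true = descOf xs := by
  apply List.eq_of_perm_of_sorted (le := fun a b : Int => b ≤ a)
  · intro a b _ _ h1 h2; omega
  · exact PySem.List.sorted_pairwise_rev xs (fun x => x)
  · unfold descOf
    simp only [List.flatMap_cons, List.flatMap_nil, List.append_nil, List.pairwise_append,
      List.pairwise_replicate, List.mem_replicate, List.mem_append]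
    repeat' apply And.intro
    all_goals (intros; omega)
  · refine (PySem.List.sorted_perm xs _ true).trans ?_
    rw [List.perm_iff_count]
    intro a
    unfold descOf
    simp only [List.flatMap_cons, List.flatMap_nil, List.append_nil, List.count_append,
      List.count_replicate, beq_iff_eq]
    by_cases h9 : (9:Int) = a; · subst h9; simp
    by_cases h8 : (8:Int) = a; · subst h8; simp
    by_cases h7 : (7:Int) = a; · subst h7; simp
    by_cases h6 : (6:Int) = a; · subst h6; simp
    by_cases h5 : (5:Int) = a; · subst h5; simp
    by_cases h4 : (4:Int) = a; · subst h4; simp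
    by_cases h3 : (3:Int) = a; · subst h3; simp
    by_cases h2 : (2:Int) = a; · subst h2; simp
    by_cases h1 : (1:Int) = a; · subst h1; simp
    by_cases h0 : (0:Int) = a; · subst h0; simp
    have ha : a ∉ xs := fun hm => by have := h a hm; omega
    simp [h9, h8, h7, h6, h5, h4, h3, h2, h1, h0, List.count_eq_zero.mpr ha]

lemma flatten_replicate_singleton {α : Type} (k : Nat) (a : α) :
    (List.replicate k [a]).flatten = List.replicate k a := by
  induction k with
  | zero => rfl
  | succ k ih => simp [List.replicate_succ, ih]

-- the counting loop of B computes the digit counts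
lemma count_fold (cs : List Char) : ∀ (cnts : List Int), cnts.length = 10 →
    (∀ c ∈ cs, c ∈ digitChars) → ∀ d : Nat, d < 10 →
    (cs.foldl (fun cnts c =>
        cnts.set (pyIntChar c).toNat (cnts.getD (pyIntChar c).toNat 0 + 1)) cnts).getD d 0
      = cnts.getD d 0 + ((cs.map pyIntChar).count (d : Int) : Int) := by
  induction cs with
  | nil => intro cnts _ _ d _; simp
  | cons c cs ih =>
    intro cnts hlen hdig d hd
    obtain ⟨h0, h9, -⟩ := pyIntChar_digit c (hdig c List.mem_cons_self)
    have hi : (pyIntChar c).toNat < 10 := by omega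
    rw [List.foldl_cons]
    rw [ih _ (by simpa using hlen) (fun c' hc' => hdig c' (List.mem_cons_of_mem _ hc')) d hd]
    have hset : ((cnts.set (pyIntChar c).toNat (cnts.getD (pyIntChar c).toNat 0 + 1)).getD d 0)
        = cnts.getD d 0 + (if pyIntChar c = (d : Int) then 1 else 0) := by
      by_cases he : (pyIntChar c).toNat = d
      · rw [if_pos (by omega)]
        rw [List.getD_eq_getElem?_getD, List.getElem?_set, if_pos he, if_pos (by omega)]
        simp only [Option.getD_some, List.getD_eq_getElem?_getD, he]
      · rw [if_neg (by omega)]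
        rw [List.getD_eq_getElem?_getD, List.getElem?_set, if_neg he]
        simp [List.getD_eq_getElem?_getD]
    rw [hset, List.map_cons, List.count_cons]
    simp only [beq_iff_eq]
    split_ifs with hc <;> simp <;> omega

-- ===== VERDICT (by name: the statement is the Claim_ definition above) =====
theorem solution_spec : Claim_equal_solution := by
  intro n _ hpre
  unfold Spec_solution solution solution_alt
  dsimp only
  have hdig := mem_toChars_digit n hpre
  set cs := PySem.Int.toChars n with hcs
  -- A's first loop builds the mapped value list
  rw [PySem.List.foldl_append_eq_flatMap (fun i => [pyIntChar i]) cs, List.nil_append]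
  have hmap : ∀ l : List Char, l.flatMap (fun i => [pyIntChar i]) = l.map pyIntChar := by
    intro l
    induction l with
    | nil => rfl
    | cons c l ih => simp [ih]
  rw [hmap cs]
  set vs := cs.map pyIntChar with hvs
  have hv : ∀ v ∈ vs, 0 ≤ v ∧ v ≤ 9 := by
    intro v hvm
    rcases List.mem_map.mp hvm with ⟨c, hc, rfl⟩
    obtain ⟨a, b, -⟩ := pyIntChar_digit c (hdig c hc)
    exact ⟨a, b⟩
  rw [sorted_eq_descOf vs hv]
  -- B's counting loop computes the digit counts
  set counts := cs.foldl
      (fun cnts c => cnts.set (pyIntChar c).toNat (cnts.getD (pyIntChar c).toNat 0 + 1))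
      (List.replicate 10 0 : List Int) with hcounts
  have hcnt : ∀ d : Nat, d < 10 → counts.getD d 0 = (vs.count (d : Int) : Int) := by
    intro d hd
    rw [hcounts, count_fold cs _ (by simp) hdig d hd]
    interval_cases d <;> simp [← hvs]
  -- both result strings coincide
  have hrange : PySem.List.pyRange 9 (-1) (-1) = ([9,8,7,6,5,4,3,2,1,0] : List Int) := by decide
  rw [hrange, PySem.List.foldl_append_eq_flatMap, PySem.List.foldl_append_eq_flatMap,
    List.nil_append, List.nil_append]
  unfold descOf
  rw [List.flatMap_assoc]
  have hlists : ∀ d ∈ ([9,8,7,6,5,4,3,2,1,0] : List Int),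
      List.flatMap PySem.Int.toChars (List.replicate (vs.count d) d)
        = PySem.List.pyRepeat (PySem.Int.toChars d) (counts.getD d.toNat 0) := by
    intro d hdm
    have hd0 : 0 ≤ d ∧ d ≤ 9 := by fin_cases hdm <;> exact ⟨by decide, by decide⟩
    have hsing : ∃ ch, PySem.Int.toChars d = [ch] := by
      obtain ⟨h0, h9⟩ := hd0
      interval_cases d <;> exact ⟨_, rfl⟩
    obtain ⟨ch, hch⟩ := hsing
    have hdn : ((d.toNat : Nat) : Int) = d := by omega
    rw [List.flatMap_replicate, hch, flatten_replicate_singleton,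
      PySem.List.pyRepeat_singleton, hcnt d.toNat (by omega), hdn, Int.toNat_natCast]
  rw [List.flatMap_congr hlists]
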